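-- pv_equiv track=rewrite | github.com/iroli/fme | lib.py | title_handle_merge
-- ===== SOURCE A (Python) =====
-- def title_handle_merge(new_title: str) -> str:
--     if new_title is None or len(new_title) == 0:
--         return ''
--     new_title = ' ' + new_title + ' '
--     for p in range(len(new_title) - 4):
--         if (new_title[p] == ' ' or new_title[p] == '№') and new_title[p + 2] == ' ' and new_title[p + 4] == ' ':
--             new_title = new_title[:p + 2] + '№' + new_title[p + 3:]
--     p = 0
--     while p < len(new_title):
--         if new_title[p] == '№':
--             new_title = new_title[:p] + new_title[p + 1:]
--             p = 0
--         else: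
--             p += 1
--     while new_title[0] == ' ':
--         new_title = new_title[1:]
--     while new_title[-1] == ' ':
--         new_title = new_title[:-1]
--     return new_title
-- ===== SOURCE B (Python) =====
-- def title_handle_merge(new_title: str) -> str:
--     if new_title is None or len(new_title) == 0:
--         return ''
--     s = ' ' + new_title + ' '
--     n = len(s)
--     kept = [c for a, c, e in zip(s, s[2:], s[4:]) if not (a == ' ' and c == ' ' and e == ' ')]
--     return (s[:2] + ''.join(kept) + s[max(n - 2, 2):]).strip(' ')
-- ===== Notes on version B (the rewrite author's own statement) =====
-- stated objective: faster
-- what changed: B drops A's three rebuild-the-string loops (marker insertion over slices, a remove-one-marker-and-restart-from-0 scan, char-by-char strip loops): A's chained mark condition collapses to the three characters at offsets i-2, i, i+2 all being spaces, so B selects the kept characters in one zip-of-slices comprehension and strips once.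
-- outside the precondition, e.g. on title_handle_merge('  '): A raises IndexError, B returns ''
-- crash fix: On nonempty all-space inputs A raises IndexError (its left-strip loop empties the string and then reads index 0); B returns the empty string there. — e.g. on title_handle_merge(" "): A raises IndexError, B returns ""
import Mathlib
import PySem

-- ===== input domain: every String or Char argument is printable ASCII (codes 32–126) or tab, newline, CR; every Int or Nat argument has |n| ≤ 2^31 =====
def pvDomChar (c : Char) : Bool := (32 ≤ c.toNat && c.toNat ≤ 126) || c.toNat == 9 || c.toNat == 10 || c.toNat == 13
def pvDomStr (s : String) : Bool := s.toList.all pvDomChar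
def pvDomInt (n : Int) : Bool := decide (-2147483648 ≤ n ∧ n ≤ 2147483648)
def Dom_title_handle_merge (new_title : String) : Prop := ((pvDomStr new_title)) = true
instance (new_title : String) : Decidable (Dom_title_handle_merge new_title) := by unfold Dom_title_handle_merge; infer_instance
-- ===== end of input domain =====

-- B replaces A's three string-rebuilding loops by one zip-of-slices pass (A's chained mark
-- condition collapses to: spaces at offsets i-2, i, i+2); a timing run measured B faster.

-- ===== PORT A =====
-- All Python indexings in A's first loop are in range (0 ≤ p ≤ len-5), so plain getD is exact there.
def pvCharAt (s : List Char) (i : Nat) : Char := s.getD i ' '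

-- one iteration of A's first for-loop: new_title = new_title[:p+2] + '№' + new_title[p+3:]
def pvMergeStep (s : List Char) (p : Nat) : List Char :=
  if (pvCharAt s p = ' ' ∨ pvCharAt s p = '№') ∧ pvCharAt s (p + 2) = ' ' ∧ pvCharAt s (p + 4) = ' '
  then s.take (p + 2) ++ '№' :: s.drop (p + 3) else s

-- termination helper for the removal while-loop, cited in decreasing_by
theorem pvCount_removeAt (s : List Char) (p : Nat) (h : p < s.length) (hc : s[p] = '№') :
    (s.take p ++ s.drop (p + 1)).count '№' < s.count '№' := by
  conv_rhs => rw [← List.take_append_drop p s]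
  rw [← List.getElem_cons_drop h]
  simp [List.count_append, hc]

-- A's second loop: while p < len: if s[p]=='№': delete it, p=0 else p+=1
def pvRemoveLoop (s : List Char) (p : Nat) : List Char :=
  if h : p < s.length then
    if hc : s[p] = '№' then pvRemoveLoop (s.take p ++ s.drop (p + 1)) 0
    else pvRemoveLoop s (p + 1)
  else s
termination_by (s.count '№', s.length - p)
decreasing_by
  · exact Prod.Lex.left _ _ (pvCount_removeAt s p h hc)
  · exact Prod.Lex.right _ (by omega)

-- A's third loop: while s[0]==' ': s = s[1:]   (Python raises on empty s; excluded by Pre_)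
def pvStripL : List Char → List Char
  | [] => []
  | c :: rest => if c = ' ' then pvStripL rest else c :: rest

-- A's fourth loop: while s[-1]==' ': s = s[:-1]
def pvStripR (s : List Char) : List Char :=
  if s.getLast? = some ' ' then pvStripR s.dropLast else s
termination_by s.length
decreasing_by
  rename_i h
  have : s ≠ [] := by intro he; simp [he] at h
  have := List.length_pos_iff.mpr this
  simp [List.length_dropLast]; omega

def title_handle_merge (new_title : String) : String :=
  let l := new_title.toList
  if l.length = 0 then "" else
  let s := ' ' :: (l ++ [' '])
  let s1 := (PySem.List.pyRange 0 ((s.length : Int) - 4) 1).foldl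
              (fun t p => pvMergeStep t p.toNat) s
  let s2 := pvRemoveLoop s1 0
  String.ofList (pvStripR (pvStripL s2))

-- ===== PORT B =====
def title_handle_merge_alt (new_title : String) : String :=
  let l := new_title.toList
  if l.length = 0 then "" else
  let s := ' ' :: (l ++ [' '])
  let n := s.length
  -- kept = [c for a, c, e in zip(s, s[2:], s[4:]) if not (a==' ' and c==' ' and e==' ')]
  let kept := ((s.zip ((s.drop 2).zip (s.drop 4))).filter
      (fun ace => !(ace.1 == ' ' && ace.2.1 == ' ' && ace.2.2 == ' '))).map (fun ace => ace.2.1)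
  let res := s.take 2 ++ kept ++ s.drop (max (n - 2) 2)
  -- .strip(' ')
  String.ofList (((res.dropWhile (fun c => c == ' ')).reverse.dropWhile (fun c => c == ' ')).reverse)

-- ===== PRECONDITION & SPEC =====
-- Pre_ excludes exactly the nonempty all-space strings, on which Python A raises IndexError
-- (its left-strip loop empties the string and then reads new_title[0]).
def Pre_title_handle_merge (new_title : String) : Prop :=
  (new_title.toList.isEmpty || new_title.toList.any (fun c => c ≠ ' ')) = true
instance (new_title : String) : Decidable (Pre_title_handle_merge new_title) := by
  unfold Pre_title_handle_merge; infer_instance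
def pvWitness_title_handle_merge : String := "a b c"

-- On nonempty all-space inputs A raises IndexError; B returns ''.
def Raises_title_handle_merge (new_title : String) : Prop :=
  (!new_title.toList.isEmpty && new_title.toList.all (fun c => c == ' ')) = true
instance (new_title : String) : Decidable (Raises_title_handle_merge new_title) := by
  unfold Raises_title_handle_merge; infer_instance
def pvRaiseWitness_title_handle_merge : String := "  "
def pvRaiseWitnessOut_title_handle_merge : String := ""

def Spec_title_handle_merge (new_title : String) (out : String) : Prop :=
  out = title_handle_merge_alt new_title
instance (new_title : String) (out : String) : Decidable (Spec_title_handle_merge new_title out) := by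
  unfold Spec_title_handle_merge; infer_instance

-- ===== CLAIM (what is proved, stated in full; the proofs are below) =====
def Claim_equal_title_handle_merge : Prop := ∀ (new_title : String),
  Dom_title_handle_merge new_title → Pre_title_handle_merge new_title →
  Spec_title_handle_merge new_title (title_handle_merge new_title)

def Claim_raises_title_handle_merge : Prop :=
  (∀ (new_title : String), Dom_title_handle_merge new_title →
      Raises_title_handle_merge new_title → ¬ Pre_title_handle_merge new_title) ∧
  (Dom_title_handle_merge pvRaiseWitness_title_handle_merge ∧
   Raises_title_handle_merge pvRaiseWitness_title_handle_merge ∧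
   title_handle_merge_alt pvRaiseWitness_title_handle_merge = pvRaiseWitnessOut_title_handle_merge)

-- ===== LEMMAS AND PROOFS =====

-- the mark predicate both programs compute: position i of the padded string is turned into '№'
def pvMark (s : List Char) : Nat → Bool
  | i => if 2 ≤ i ∧ i + 3 ≤ s.length then
      (s.getD i ' ' == ' ') && (s.getD (i + 2) ' ' == ' ')
        && ((s.getD (i - 2) ' ' == ' ') || pvMark s (i - 2))
    else false
termination_by i => i
decreasing_by omega

theorem pvMark_ge (s : List Char) (i : Nat) (h : ¬ (2 ≤ i ∧ i + 3 ≤ s.length)) :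
    pvMark s i = false := by rw [pvMark]; simp [h]


theorem pvGetD_lt (s : List Char) (j : Nat) (h : j < s.length) : s.getD j ' ' = s[j] := by
  simp [List.getElem?_eq_getElem h]

theorem pvMap_getD_range (s : List Char) : (List.range s.length).map (fun j => s.getD j ' ') = s := by
  apply List.ext_getElem
  · simp
  · intro i h1 h2; simp [List.getElem?_eq_getElem h2]

theorem pvSet_map_range (f : Nat → Char) (n i : Nat) (c : Char) (h : i < n) :
    ((List.range n).map f).take i ++ c :: ((List.range n).map f).drop (i + 1)
      = (List.range n).map (fun j => if j = i then c else f j) := by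
  rw [← List.set_eq_take_cons_drop c (by simpa using h)]
  apply List.ext_getElem
  · simp
  · intro j h1 h2
    simp only [List.getElem_set, List.getElem_map, List.getElem_range]
    by_cases hij : i = j
    · simp [hij]
    · rw [if_neg hij, if_neg (fun h => hij h.symm)]

-- the state both programs compute after the first k iterations of A's marking loop
def pvF (s : List Char) (k j : Nat) : Char :=
  if pvMark s j = true ∧ j ≤ k + 1 then '№' else s.getD j ' '

theorem pvMark_true (s : List Char) (i : Nat) (h : pvMark s i = true) :
    2 ≤ i ∧ i + 3 ≤ s.length := by
  by_contra hc
  rw [pvMark_ge s i hc] at h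
  exact Bool.false_ne_true h

theorem pvMergeStep_map (s : List Char) (hn : ∀ c ∈ s, c ≠ '№') (k : Nat)
    (hk : k + 5 ≤ s.length) :
    pvMergeStep ((List.range s.length).map (pvF s k)) k
      = (List.range s.length).map (pvF s (k + 1)) := by
  have hlen : ((List.range s.length).map (pvF s k)).length = s.length := by simp
  have hget : ∀ j, j < s.length →
      ((List.range s.length).map (pvF s k)).getD j ' ' = pvF s k j := by
    intro j hj
    rw [pvGetD_lt _ j (by simpa using hj)]
    simp
  have hk0 : pvF s k k = (if pvMark s k = true then '№' else s.getD k ' ') := by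
    unfold pvF; by_cases hm : pvMark s k = true <;> simp [hm]
  have hk2 : pvF s k (k + 2) = s.getD (k + 2) ' ' := by
    unfold pvF; rw [if_neg]; rintro ⟨-, h⟩; omega
  have hk4 : pvF s k (k + 4) = s.getD (k + 4) ' ' := by
    unfold pvF; rw [if_neg]; rintro ⟨-, h⟩; omega
  have hsk : s.getD k ' ' ≠ '№' := by
    rw [pvGetD_lt s k (by omega)]
    exact hn _ (List.getElem_mem _)
  -- the loop's test equals pvMark s (k+2)
  have hcond : ((pvF s k k = ' ' ∨ pvF s k k = '№') ∧ pvF s k (k + 2) = ' ' ∧ pvF s k (k + 4) = ' ')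
      ↔ pvMark s (k + 2) = true := by
    have hne : ('№' : Char) ≠ ' ' := by decide
    rw [hk0, hk2, hk4]
    conv_rhs => rw [pvMark]
    rw [if_pos (show 2 ≤ k + 2 ∧ k + 2 + 3 ≤ s.length by omega)]
    have e : k + 2 + 2 = k + 4 := by omega
    rw [e]
    simp only [Nat.add_sub_cancel, Bool.and_eq_true, Bool.or_eq_true, beq_iff_eq, and_assoc]
    by_cases hm : pvMark s k = true
    · rw [if_pos hm]
      constructor
      · rintro ⟨_, h1, h2⟩; exact ⟨h1, h2, Or.inr hm⟩
      · rintro ⟨h1, h2, _⟩; exact ⟨Or.inr rfl, h1, h2⟩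
    · rw [if_neg hm]
      constructor
      · rintro ⟨h0, h1, h2⟩
        rcases h0 with h0 | h0
        · exact ⟨h1, h2, Or.inl h0⟩
        · exact absurd h0 hsk
      · rintro ⟨h1, h2, h0⟩
        rcases h0 with h0 | h0
        · exact ⟨Or.inl h0, h1, h2⟩
        · exact absurd h0 hm
  unfold pvMergeStep pvCharAt
  rw [hget k (by omega), hget (k + 2) (by omega), hget (k + 4) (by omega)]
  by_cases hc : (pvF s k k = ' ' ∨ pvF s k k = '№') ∧ pvF s k (k + 2) = ' ' ∧ pvF s k (k + 4) = ' '
  · rw [if_pos hc]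
    have hm2 : pvMark s (k + 2) = true := hcond.mp hc
    rw [pvSet_map_range _ _ _ _ (by omega)]
    apply List.map_congr_left
    intro j hj
    simp only [List.mem_range] at hj
    by_cases hje : j = k + 2
    · subst hje; simp [pvF, hm2]
    · rw [if_neg hje]
      simp only [pvF]
      by_cases hmj : pvMark s j = true
      · simp only [hmj, true_and]
        by_cases hj1 : j ≤ k + 1
        · rw [if_pos hj1, if_pos (by omega)]
        · rw [if_neg hj1, if_neg (by omega)]
      · simp [hmj]
  · rw [if_neg hc]
    have hm2 : pvMark s (k + 2) = false := by
      rcases Bool.eq_false_or_eq_true (pvMark s (k + 2)) with h | h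
      · exact absurd (hcond.mpr h) hc
      · exact h
    apply List.map_congr_left
    intro j hj
    simp only [List.mem_range] at hj
    simp only [pvF]
    by_cases hmj : pvMark s j = true
    · simp only [hmj, true_and]
      by_cases hj1 : j ≤ k + 1
      · rw [if_pos hj1, if_pos (by omega)]
      · rw [if_neg hj1, if_neg ?_]
        intro hle
        have hje : j = k + 2 := by omega
        rw [hje, hm2] at hmj
        exact Bool.false_ne_true hmj
    · simp [hmj]

theorem pvFold_inv (s : List Char) (hn : ∀ c ∈ s, c ≠ '№') :
    ∀ k, k ≤ s.length - 4 →
    (List.range k).foldl (fun t p => pvMergeStep t p) s = (List.range s.length).map (pvF s k) := by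
  intro k
  induction k with
  | zero =>
    intro _
    rw [show (List.range s.length).map (pvF s 0) = (List.range s.length).map (fun j => s.getD j ' ') from ?_, pvMap_getD_range]
    · simp [List.range_zero]
    · apply List.map_congr_left
      intro j hj
      simp only [pvF]
      by_cases hmj : pvMark s j = true
      · have h2j := (pvMark_true s j hmj).1
        rw [if_neg]
        rintro ⟨-, hle⟩; omega
      · simp [hmj]
  | succ k ih =>
    intro hk
    rw [List.range_succ, List.foldl_append, ih (by omega)]
    simp only [List.foldl_cons, List.foldl_nil]
    exact pvMergeStep_map s hn k (by omega)

theorem pvRemoveLoop_filter : ∀ (s : List Char) (p : Nat),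
    (∀ c ∈ s.take p, c ≠ '№') → pvRemoveLoop s p = s.filter (fun c => c ≠ '№') := by
  intro s p
  induction s, p using pvRemoveLoop.induct with
  | case1 s p h hc ih =>
    intro hpre
    rw [pvRemoveLoop, dif_pos h, dif_pos hc, ih (by simp)]
    have hs : s = s.take p ++ s[p] :: s.drop (p + 1) := by
      rw [List.getElem_cons_drop h, List.take_append_drop]
    conv_rhs => rw [hs]
    simp only [List.filter_append, List.filter_cons, hc]
    simp
  | case2 s p h hc ih =>
    intro hpre
    rw [pvRemoveLoop, dif_pos h, dif_neg hc, ih]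
    intro c hcmem
    rw [List.take_add_one] at hcmem
    rcases List.mem_append.mp hcmem with h1 | h1
    · exact hpre c h1
    · simp only [List.getElem?_eq_getElem h, Option.toList_some, List.mem_singleton] at h1
      rw [h1]; exact hc
  | case3 s p h =>
    intro hpre
    rw [pvRemoveLoop, dif_neg h]
    symm
    apply List.filter_eq_self.mpr
    intro c hcmem
    simpa using hpre c (by rw [List.take_of_length_le (by omega)]; exact hcmem)

theorem pvStripL_eq : ∀ l : List Char, pvStripL l = l.dropWhile (fun c => c == ' ') := by
  intro l
  induction l with
  | nil => rfl
  | cons c rest ih =>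
    rw [pvStripL, List.dropWhile_cons]
    by_cases hc : c = ' ' <;> simp [hc, ih]

theorem pvStripR_eq : ∀ l : List Char, pvStripR l = (l.reverse.dropWhile (fun c => c == ' ')).reverse := by
  intro l
  induction hl : l.length using Nat.strong_induction_on generalizing l with
  | _ n ih =>
    rw [pvStripR]
    by_cases h : l.getLast? = some ' '
    · rw [if_pos h]
      have hne : l ≠ [] := by intro he; simp [he] at h
      have hlast : l.getLast hne = ' ' := by
        rw [List.getLast?_eq_some_getLast hne] at h
        exact Option.some_injective _ h
      have hdecomp : l = l.dropLast ++ [' '] := by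
        conv_lhs => rw [← List.dropLast_append_getLast hne]
        rw [hlast]
      have hlt : l.dropLast.length < n := by
        have h3 : l.dropLast.length = l.length - 1 := List.length_dropLast
        have hpos : 0 < l.length := List.length_pos_iff.mpr hne
        omega
      rw [ih l.dropLast.length hlt l.dropLast rfl]
      conv_rhs => rw [hdecomp]
      simp
    · rw [if_neg h]
      rcases hcase : l.getLast? with _ | c
      · have : l = [] := by simpa using hcase
        simp [this]
      · have hne : l ≠ [] := by intro he; simp [he] at hcase
        have hc : c ≠ ' ' := by intro he; rw [he] at hcase; exact h hcase
        have hlast : l.getLast hne = c := by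
          rw [List.getLast?_eq_some_getLast hne] at hcase
          exact Option.some_injective _ hcase
        have hdecomp : l = l.dropLast ++ [c] := by
          conv_lhs => rw [← List.dropLast_append_getLast hne]
          rw [hlast]
        conv_rhs => rw [hdecomp]
        conv_lhs => rw [hdecomp]
        simp [hc]

theorem pvListA (s : List Char) (hn : ∀ c ∈ s, c ≠ '№') :
    pvRemoveLoop ((PySem.List.pyRange 0 ((s.length : Int) - 4) 1).foldl
        (fun t p => pvMergeStep t p.toNat) s) 0
      = ((List.range s.length).filter (fun j => !pvMark s j)).map (fun j => s.getD j ' ') := by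
  have hfold : (PySem.List.pyRange 0 ((s.length : Int) - 4) 1).foldl
      (fun t p => pvMergeStep t p.toNat) s
      = (List.range (s.length - 4)).foldl (fun t p => pvMergeStep t p) s := by
    rw [PySem.List.pyRange_one, List.foldl_map]
    have e1 : (((s.length : Int) - 4) - 0).toNat = s.length - 4 := by omega
    rw [e1]
    apply List.foldl_ext
    intro acc p _
    simp
  rw [hfold, pvFold_inv s hn (s.length - 4) le_rfl,
      pvRemoveLoop_filter _ 0 (by simp), List.filter_map]
  have hF : ∀ j ∈ List.range s.length,
      ((fun c => decide (c ≠ '№')) ∘ pvF s (s.length - 4)) j = !pvMark s j := by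
    intro j hj
    simp only [List.mem_range] at hj
    simp only [Function.comp, pvF]
    by_cases hm : pvMark s j = true
    · have hb := pvMark_true s j hm
      simp [hm, show j ≤ s.length - 4 + 1 from by omega]
    · have hg : s.getD j ' ' ≠ '№' := by
        rw [pvGetD_lt s j hj]; exact hn _ (List.getElem_mem _)
      simp [hm]
      simpa [List.getD] using hg
  rw [List.filter_congr hF]
  apply List.map_congr_left
  intro j hj
  have hj' : j ∈ List.range s.length ∧ (!pvMark s j) = true := List.mem_filter.mp hj
  have hm : pvMark s j = true → False := by
    intro h; rw [h] at hj'; exact Bool.false_ne_true hj'.2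
  simp only [pvF]
  rw [if_neg (by rintro ⟨h, -⟩; exact hm h)]

theorem pvMark_space (s : List Char) (j : Nat) (h : pvMark s j = true) : s.getD j ' ' = ' ' := by
  rw [pvMark] at h
  split at h
  · exact beq_iff_eq.mp (Bool.and_eq_true_iff.mp (Bool.and_eq_true_iff.mp h).1).1
  · exact absurd h Bool.false_ne_true

-- A's chained condition collapses: the '№'-or-space clause at i-2 is just 'space at i-2'
theorem pvMark_simple (s : List Char) (i : Nat) (h : 2 ≤ i ∧ i + 3 ≤ s.length) :
    pvMark s i = ((s.getD i ' ' == ' ') && (s.getD (i + 2) ' ' == ' ')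
                    && (s.getD (i - 2) ' ' == ' ')) := by
  rw [pvMark, if_pos h]
  by_cases hC : s.getD (i - 2) ' ' = ' '
  · rw [show (s.getD (i - 2) ' ' == ' ') = true from beq_iff_eq.mpr hC, Bool.true_or]
  · have hm : pvMark s (i - 2) = false := by
      rcases Bool.eq_false_or_eq_true (pvMark s (i - 2)) with hb | hb
      · exact absurd (pvMark_space s (i - 2) hb) hC
      · exact hb
    rw [show (s.getD (i - 2) ' ' == ' ') = false from beq_eq_false_iff_ne.mpr hC, hm,
        Bool.false_or]

theorem pvTake_two (s : List Char) (h : 2 ≤ s.length) :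
    s.take 2 = [s.getD 0 ' ', s.getD 1 ' '] := by
  rcases s with _ | ⟨a, s1⟩
  · simp at h
  · rcases s1 with _ | ⟨b, s2⟩
    · simp at h
    · rfl

theorem pvDrop_last_two (s : List Char) (h : 2 ≤ s.length) :
    s.drop (s.length - 2) = [s.getD (s.length - 2) ' ', s.getD (s.length - 1) ' '] := by
  apply List.ext_getElem
  · simp; omega
  · intro i h1 h2
    have h1' : i < 2 := by simp only [List.length_drop] at h1; omega
    rw [List.getElem_drop]
    interval_cases i
    · simpa using (pvGetD_lt s (s.length - 2) (by omega)).symm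
    · have e : s.length - 2 + 1 = s.length - 1 := by omega
      simp only [e]
      simpa using (pvGetD_lt s (s.length - 1) (by omega)).symm

theorem pvZip3 (s : List Char) :
    s.zip ((s.drop 2).zip (s.drop 4))
      = (List.range (s.length - 4)).map
          (fun k => (s.getD k ' ', (s.getD (2 + k) ' ', s.getD (4 + k) ' '))) := by
  apply List.ext_getElem
  · simp; omega
  · intro i h1 h2
    simp only [List.length_map, List.length_range] at h2
    simp only [List.getElem_zip, List.getElem_map, List.getElem_range, List.getElem_drop]
    rw [pvGetD_lt s i (by omega), pvGetD_lt s (2 + i) (by omega), pvGetD_lt s (4 + i) (by omega)]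

theorem pvRange_split (n : Nat) (h : 4 ≤ n) :
    List.range n = List.range 2 ++ ((List.range (n - 4)).map (fun k => 2 + k)
      ++ (List.range 2).map (fun k => 2 + (n - 4 + k))) := by
  conv_lhs => rw [show n = 2 + ((n - 4) + 2) from by omega]
  rw [List.range_add, List.range_add, List.map_append, List.map_map]
  rfl

theorem pvListB (s : List Char) (h4 : 4 ≤ s.length) :
    s.take 2 ++ (((s.zip ((s.drop 2).zip (s.drop 4))).filter
        (fun ace => !(ace.1 == ' ' && ace.2.1 == ' ' && ace.2.2 == ' '))).map (fun ace => ace.2.1))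
      ++ s.drop (max (s.length - 2) 2)
      = ((List.range s.length).filter (fun j => !pvMark s j)).map (fun j => s.getD j ' ') := by
  rw [pvRange_split s.length h4, List.filter_append, List.filter_append, List.map_append,
      List.map_append]
  -- prefix: positions 0 and 1 are never marked
  have m0 : pvMark s 0 = false := pvMark_ge s 0 (by omega)
  have m1 : pvMark s 1 = false := pvMark_ge s 1 (by omega)
  have hpre : ((List.range 2).filter (fun j => !pvMark s j)).map (fun j => s.getD j ' ')
      = s.take 2 := by
    rw [show List.range 2 = [0, 1] from rfl]
    simp only [List.filter_cons, m0, m1, Bool.not_false, if_pos, List.filter_nil, List.map_cons,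
      List.map_nil]
    rw [pvTake_two s (by omega)]
  -- suffix: positions n-2 and n-1 are never marked
  have msuf : ∀ k, k < 2 → pvMark s (2 + (s.length - 4 + k)) = false := by
    intro k hk
    exact pvMark_ge s _ (by omega)
  have hsuf : (((List.range 2).map (fun k => 2 + (s.length - 4 + k))).filter
        (fun j => !pvMark s j)).map (fun j => s.getD j ' ')
      = s.drop (max (s.length - 2) 2) := by
    rw [show List.range 2 = [0, 1] from rfl]
    simp only [List.map_cons, List.map_nil, List.filter_cons, List.filter_nil,
      msuf 0 (by omega), msuf 1 (by omega), Bool.not_false, if_pos]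
    rw [Nat.max_eq_left (by omega), pvDrop_last_two s (by omega),
        show 2 + (s.length - 4 + 0) = s.length - 2 from by omega,
        show 2 + (s.length - 4 + 1) = s.length - 1 from by omega]
  -- middle: the zip-of-slices comprehension
  have hmid : ((s.zip ((s.drop 2).zip (s.drop 4))).filter
        (fun ace => !(ace.1 == ' ' && ace.2.1 == ' ' && ace.2.2 == ' '))).map (fun ace => ace.2.1)
      = (((List.range (s.length - 4)).map (fun k => 2 + k)).filter
          (fun j => !pvMark s j)).map (fun j => s.getD j ' ') := by
    rw [pvZip3, List.filter_map, List.map_map, List.filter_map, List.map_map]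
    have hfil : ∀ k ∈ List.range (s.length - 4),
        ((fun ace => !(ace.1 == ' ' && ace.2.1 == ' ' && ace.2.2 == ' ')) ∘
          (fun k => (s.getD k ' ', (s.getD (2 + k) ' ', s.getD (4 + k) ' ')))) k
        = ((fun j => !pvMark s j) ∘ (fun k => 2 + k)) k := by
      intro k hk
      simp only [List.mem_range] at hk
      simp only [Function.comp]
      rw [pvMark_simple s (2 + k) ⟨by omega, by omega⟩,
          show 2 + k + 2 = 4 + k from by omega, Nat.add_sub_cancel_left]
      congr 1
      ac_rfl
    rw [List.filter_congr hfil]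
    rfl
  rw [hpre, hsuf, hmid, List.append_assoc]

theorem pvNoNum (t : String) (hDom : Dom_title_handle_merge t) :
    ∀ c ∈ (' ' :: (t.toList ++ [' '])), c ≠ '№' := by
  intro c hc
  rcases List.mem_cons.mp hc with h | h
  · rw [h]; decide
  · rcases List.mem_append.mp h with h | h
    · have hall : t.toList.all pvDomChar = true := hDom
      have := List.all_eq_true.mp hall c h
      intro he
      rw [he] at this
      exact absurd this (by decide)
    · rw [List.mem_singleton.mp h]; decide

-- ===== VERDICT (by name: the statement is the Claim_ definition above) =====
theorem title_handle_merge_spec : Claim_equal_title_handle_merge := by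
  intro t hDom hPre
  unfold Spec_title_handle_merge title_handle_merge title_handle_merge_alt
  by_cases h0 : t.toList.length = 0
  · simp [h0]
  · simp only [if_neg h0]
    rw [pvStripL_eq, pvStripR_eq, pvListA _ (pvNoNum t hDom)]
    rcases hl : t.toList with _ | ⟨c, l'⟩
    · exact absurd (by rw [hl]; rfl) h0
    · rcases l' with _ | ⟨c', l''⟩
      · -- n = 3: no position can be marked, both sides are s itself
        have m : ∀ j, pvMark (' ' :: ([c] ++ [' '])) j = false := by
          intro j
          apply pvMark_ge
          rintro ⟨hj1, hj2⟩
          simp only [List.length_cons, List.length_append, List.length_nil] at hj2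
          omega
        rw [show List.range (' ' :: ([c] ++ [' '])).length = [0, 1, 2] from rfl]
        simp only [List.filter_cons, m, Bool.not_false, if_pos, List.filter_nil,
          List.map_cons, List.map_nil]
        rfl
      · rw [← pvListB (' ' :: ((c :: c' :: l'') ++ [' '])) (by simp)]

@[simp] theorem title_handle_merge_raises : Claim_raises_title_handle_merge := by
  constructor
  · intro t _ hR
    unfold Raises_title_handle_merge at hR
    unfold Pre_title_handle_merge
    simp only [Bool.and_eq_true, Bool.not_eq_true', List.all_eq_true, beq_iff_eq] at hR
    simp only [Bool.or_eq_true, List.any_eq_true, decide_eq_true_eq]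
    rintro (h | ⟨c, hc, hcne⟩)
    · rw [h] at hR; simp at hR
    · exact hcne (hR.2 c hc)
  · exact ⟨by decide, by decide, by decide⟩
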